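-- pv_equiv track=rewrite | github.com/HumanSignal/Adala | adala/skills/collection/entity_extraction.py | find_best_occurrence
-- ===== SOURCE A (Python) =====
-- from typing import List, Type, Optional, Dict, Any
--
-- def find_all_occurrences(text: str, substring: str) -> List[int]:
--     """Find all starting indices of substring in text (case-insensitive)."""
--     occurrences = []
--     text_lower = text.lower()
--     substring_lower = substring.lower()
--     start = 0
--     while True:
--         idx = text_lower.find(substring_lower, start)
--         if idx == -1:
--             break
--         occurrences.append(idx)
--         start = idx + 1
--     return occurrences
--
-- def is_word_boundary(text: str, start: int, end: int) -> bool: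
--     """
--     Check if the substring at text[start:end] has word boundaries on both sides.
--     A word boundary is the start/end of string, whitespace, or punctuation.
--     """
--     # Check left boundary
--     if start > 0:
--         char_before = text[start - 1]
--         if char_before.isalnum():
--             return False
--
--     # Check right boundary
--     if end < len(text):
--         char_after = text[end]
--         if char_after.isalnum():
--             return False
--
--     return True
--
-- def find_best_occurrence(
--     text: str,
--     substring: str,
--     hint_start: Optional[int],
--     used_ranges: List[tuple],
-- ) -> Optional[int]:
--     """
--     Find the best occurrence of substring in text, using multiple strategies:
--     1. Prefer word-boundary matches (standalone words) over partial matches within words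
--     2. If hint_start is provided, prefer occurrences closest to the hint
--     3. Avoid already used ranges
--
--     Args:
--         text: The input text to search in
--         substring: The substring to find
--         hint_start: The model's predicted start index (used as a hint for finding closest match)
--         used_ranges: List of (start, end) tuples representing already assigned entity ranges
--
--     Returns:
--         The start index of the best occurrence, or None if not found
--     """
--     occurrences = find_all_occurrences(text, substring)
--     if not occurrences:
--         return None
--
--     # Filter out occurrences that overlap with already used ranges
--     substring_len = len(substring)
--     valid_occurrences = []
--     for occ_start in occurrences:
--         occ_end = occ_start + substring_len
--         # Check if this occurrence overlaps with any used range
--         overlaps = False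
--         for used_start, used_end in used_ranges:
--             # Check for overlap: ranges overlap if one starts before the other ends
--             if occ_start < used_end and occ_end > used_start:
--                 overlaps = True
--                 break
--         if not overlaps:
--             valid_occurrences.append(occ_start)
--
--     if not valid_occurrences:
--         return None
--
--     # Separate into word-boundary matches and partial matches
--     word_boundary_matches = []
--     partial_matches = []
--     for occ_start in valid_occurrences:
--         occ_end = occ_start + substring_len
--         if is_word_boundary(text, occ_start, occ_end):
--             word_boundary_matches.append(occ_start)
--         else:
--             partial_matches.append(occ_start)
--
--     # Prefer word-boundary matches; fall back to partial matches if none exist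
--     candidates = word_boundary_matches if word_boundary_matches else partial_matches
--
--     # If we have a hint from the model, find the closest occurrence to it
--     if hint_start is not None:
--         return min(candidates, key=lambda x: abs(x - hint_start))
--
--     # Otherwise, return the first valid occurrence
--     return candidates[0]
-- ===== SOURCE B (Python) =====
-- from typing import List, Optional
--
-- def find_all_occurrences(text: str, substring: str) -> List[int]:
--     """Find all starting indices of substring in text (case-insensitive)."""
--     occurrences = []
--     text_lower = text.lower()
--     substring_lower = substring.lower()
--     start = 0
--     while True:
--         idx = text_lower.find(substring_lower, start)
--         if idx == -1:
--             break
--         occurrences.append(idx)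
--         start = idx + 1
--     return occurrences
--
-- def is_word_boundary(text: str, start: int, end: int) -> bool:
--     if start > 0:
--         if text[start - 1].isalnum():
--             return False
--     if end < len(text):
--         if text[end].isalnum():
--             return False
--     return True
--
-- def find_best_occurrence(
--     text: str,
--     substring: str,
--     hint_start: Optional[int],
--     used_ranges: List[tuple],
-- ) -> Optional[int]:
--     """Single sweep over the (ascending) occurrences with the used ranges
--     sorted by start: a pointer plus a running max of range ends replaces the
--     per-occurrence scan of all used ranges; the best word-boundary and
--     partial candidates are tracked on the fly instead of building lists."""
--     occurrences = find_all_occurrences(text, substring)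
--     if not occurrences:
--         return None
--
--     L = len(substring)
--     ranges = sorted(used_ranges, key=lambda r: r[0])
--     j = 0
--     cur_max = None  # max end among ranges whose start < current occurrence end
--     best_wb = best_wb_key = None
--     best_p = best_p_key = None
--
--     for occ in occurrences:
--         end = occ + L
--         while j < len(ranges) and ranges[j][0] < end:
--             e = ranges[j][1]
--             if cur_max is None or e > cur_max:
--                 cur_max = e
--             j += 1
--         if cur_max is not None and cur_max > occ:
--             continue  # overlaps a used range
--         key = 0 if hint_start is None else abs(occ - hint_start)
--         if is_word_boundary(text, occ, end):
--             if best_wb is None or key < best_wb_key: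
--                 best_wb, best_wb_key = occ, key
--         else:
--             if best_p is None or key < best_p_key:
--                 best_p, best_p_key = occ, key
--
--     return best_wb if best_wb is not None else best_p
-- ===== Notes on version B (the rewrite author's own statement) =====
-- stated objective: faster
-- what changed: Instead of scanning every used range for every occurrence and then building valid/word-boundary/partial lists and taking a min, B sorts the used ranges once and does a single sweep over the (ascending) occurrences with a pointer and a running max of range ends for the overlap test, tracking the best word-boundary and partial candidates on the fly.
import Mathlib
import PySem

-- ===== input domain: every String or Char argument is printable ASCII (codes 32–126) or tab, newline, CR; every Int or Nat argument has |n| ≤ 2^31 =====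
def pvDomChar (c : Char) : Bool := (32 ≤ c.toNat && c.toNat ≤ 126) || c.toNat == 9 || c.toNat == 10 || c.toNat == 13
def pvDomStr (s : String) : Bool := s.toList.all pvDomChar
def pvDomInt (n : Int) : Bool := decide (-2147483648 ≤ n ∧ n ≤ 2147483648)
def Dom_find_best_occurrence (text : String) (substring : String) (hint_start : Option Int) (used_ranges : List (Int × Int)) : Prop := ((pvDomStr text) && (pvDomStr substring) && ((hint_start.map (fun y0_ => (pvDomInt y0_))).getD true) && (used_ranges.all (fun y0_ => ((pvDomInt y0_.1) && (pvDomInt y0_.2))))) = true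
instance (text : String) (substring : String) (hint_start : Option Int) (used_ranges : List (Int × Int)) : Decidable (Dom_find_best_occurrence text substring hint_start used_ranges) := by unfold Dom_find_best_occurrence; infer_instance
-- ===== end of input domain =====

-- B replaces A's per-occurrence scan of all used ranges by one sorted sweep (pointer + running
-- max of range ends) and tracks the best word-boundary/partial candidates on the fly; objective: faster.

-- ===== PORT A =====
-- shared helper: both Source A and Source B contain this identical module-level function.
-- The while-loop is ported with a fuel counter (text-length + 2 bounds the number of
-- iterations, since each found index is strictly larger than the previous start).
def pyFindAllOccAux (tl sl : List Char) (start : Int) : Nat → List Int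
  | 0 => []
  | fuel + 1 =>
    let idx := PySem.Chars.findFrom tl sl start
    if idx = -1 then [] else idx :: pyFindAllOccAux tl sl (idx + 1) fuel

def find_all_occurrences (text substring : String) : List Int :=
  pyFindAllOccAux (PySem.Str.lower text).toList (PySem.Str.lower substring).toList 0
    ((PySem.Str.lower text).toList.length + 2)

-- shared helper (identical in Source A and Source B); the two indexings are in range at every
-- call site, so pyGetD's default is never read.
def is_word_boundary (t : List Char) (s e : Int) : Bool :=
  (if 0 < s then !PySem.Chars.isalnum (PySem.List.pyGetD t (s - 1) ' ') else true) &&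
  (if e < PySem.List.len t then !PySem.Chars.isalnum (PySem.List.pyGetD t e ' ') else true)

def find_best_occurrence (text : String) (substring : String) (hint_start : Option Int) (used_ranges : List (Int × Int)) : Option Int :=
  let occurrences := find_all_occurrences text substring
  if occurrences = [] then none
  else
    let substring_len : Int := PySem.Str.len substring
    let valid := occurrences.foldl (fun acc occ =>
        if used_ranges.any (fun r => decide (occ < r.2 ∧ occ + substring_len > r.1))
        then acc else acc ++ [occ]) []
    if valid = [] then none
    else
      let p := valid.foldl (fun acc occ =>
          if is_word_boundary text.toList occ (occ + substring_len)
          then (acc.1 ++ [occ], acc.2) else (acc.1, acc.2 ++ [occ])) ([], [])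
      let candidates := if p.1 ≠ [] then p.1 else p.2
      match hint_start with
      | some h => PySem.List.min? candidates (fun x => |x - h|)
      | none => PySem.List.pyGet? candidates 0

-- ===== PORT B =====
-- the inner while-loop of Source B: advance over the sorted ranges whose start is below
-- `bound`, keeping the running max of their ends (the index j becomes the remaining suffix)
def sweepAux (bound : Int) : List (Int × Int) → Option Int → (List (Int × Int) × Option Int)
  | [], cm => ([], cm)
  | r :: rs, cm =>
      if r.1 < bound then
        sweepAux bound rs (some (match cm with | none => r.2 | some m => if r.2 > m then r.2 else m))
      else (r :: rs, cm)

-- `cur_max is not None and cur_max > occ`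
def optGtB (cm : Option Int) (occ : Int) : Bool :=
  match cm with | some m => decide (occ < m) | none => false

-- `if best is None or key < best_key: best, best_key = occ, key`
def bestUpd (b : Option (Int × Int)) (occ key : Int) : Option (Int × Int) :=
  match b with
  | none => some (occ, key)
  | some q => if key < q.2 then some (occ, key) else some q

-- the body of Source B's `for occ in occurrences` loop; state = (remaining sorted ranges,
-- cur_max, best word-boundary (occ, key), best partial (occ, key))
def stepB (tl : List Char) (hint : Option Int) (L : Int)
    (st : List (Int × Int) × Option Int × Option (Int × Int) × Option (Int × Int)) (occ : Int) :
    List (Int × Int) × Option Int × Option (Int × Int) × Option (Int × Int) :=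
  let p := sweepAux (occ + L) st.1 st.2.1
  if optGtB p.2 occ then (p.1, p.2, st.2.2.1, st.2.2.2)
  else
    let key : Int := match hint with | none => 0 | some h => |occ - h|
    if is_word_boundary tl occ (occ + L)
    then (p.1, p.2, bestUpd st.2.2.1 occ key, st.2.2.2)
    else (p.1, p.2, st.2.2.1, bestUpd st.2.2.2 occ key)

def find_best_occurrence_alt (text : String) (substring : String) (hint_start : Option Int) (used_ranges : List (Int × Int)) : Option Int :=
  let occurrences := find_all_occurrences text substring
  if occurrences = [] then none
  else
    let L : Int := PySem.Str.len substring
    let ranges := PySem.List.sorted used_ranges (fun r => r.1)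
    let st := occurrences.foldl (stepB text.toList hint_start L)
      ((ranges, none, none, none) : List (Int × Int) × Option Int × Option (Int × Int) × Option (Int × Int))
    match st.2.2.1 with
    | some q => some q.1
    | none => Option.map (fun q => q.1) st.2.2.2

-- ===== PRECONDITION & SPEC =====
def Spec_find_best_occurrence (text : String) (substring : String) (hint_start : Option Int) (used_ranges : List (Int × Int)) (out : Option Int) : Prop := out = find_best_occurrence_alt text substring hint_start used_ranges
instance (text : String) (substring : String) (hint_start : Option Int) (used_ranges : List (Int × Int)) (out : Option Int) : Decidable (Spec_find_best_occurrence text substring hint_start used_ranges out) := by unfold Spec_find_best_occurrence; infer_instance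

-- ===== CLAIM (what is proved, stated in full; the proofs are below) =====
def Claim_equal_find_best_occurrence : Prop := ∀ (text : String) (substring : String) (hint_start : Option Int) (used_ranges : List (Int × Int)), Dom_find_best_occurrence text substring hint_start used_ranges → Spec_find_best_occurrence text substring hint_start used_ranges (find_best_occurrence text substring hint_start used_ranges)

-- ===== LEMMAS AND PROOFS =====

-- proof-only abbreviations
def keyF (hint : Option Int) (o : Int) : Int := match hint with | none => 0 | some h => |o - h|
def ovlF (used : List (Int × Int)) (L o : Int) : Bool :=
  used.any (fun r => decide (o < r.2 ∧ o + L > r.1))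
def wbF (tl : List Char) (L o : Int) : Bool := is_word_boundary tl o (o + L)

def foldMax (cm : Option Int) (l : List (Int × Int)) : Option Int :=
  l.foldl (fun c r => some (match c with | none => r.2 | some m => if r.2 > m then r.2 else m)) cm

def mstep (key : Int → Int) (a : Option Int) (x : Int) : Option Int :=
  match a with
  | none => some x
  | some m => if key x < key m then some x else some m

def pureStep (tl : List Char) (hint : Option Int) (L : Int) (used : List (Int × Int))
    (b : Option (Int × Int) × Option (Int × Int)) (o : Int) :
    Option (Int × Int) × Option (Int × Int) :=
  if ovlF used L o then b
  else if wbF tl L o then (bestUpd b.1 o (keyF hint o), b.2) else (b.1, bestUpd b.2 o (keyF hint o))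

-- facts about find_all_occurrences: the produced indices are increasing
lemma findFrom_start_le (tl sl : List Char) (start : Int) (h0 : 0 ≤ start)
    (h : PySem.Chars.findFrom tl sl start ≠ -1) : start ≤ PySem.Chars.findFrom tl sl start := by
  have hf := PySem.Chars.neg_one_le_find (List.drop start.toNat (List.take (Int.toNat ↑tl.length) tl)) sl
  simp only [PySem.Chars.findFrom] at h ⊢
  split_ifs at h ⊢ with h1 h2 h3 h4 <;> omega

lemma aux_lb (fuel : Nat) : ∀ (tl sl : List Char) (start : Int), 0 ≤ start →
    ∀ x ∈ pyFindAllOccAux tl sl start fuel, start ≤ x := by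
  induction fuel with
  | zero => intro tl sl start h0 x hx; simp [pyFindAllOccAux] at hx
  | succ n ih =>
    intro tl sl start h0 x hx
    simp only [pyFindAllOccAux] at hx
    by_cases hidx : PySem.Chars.findFrom tl sl start = -1
    · simp [hidx] at hx
    · have hle := findFrom_start_le tl sl start h0 hidx
      simp only [if_neg hidx, List.mem_cons] at hx
      rcases hx with rfl | hx
      · exact hle
      · have := ih tl sl (PySem.Chars.findFrom tl sl start + 1) (by omega) x hx
        omega

lemma aux_sorted (fuel : Nat) : ∀ (tl sl : List Char) (start : Int), 0 ≤ start →
    (pyFindAllOccAux tl sl start fuel).Pairwise (· ≤ ·) := by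
  induction fuel with
  | zero => intro tl sl start h0; simp [pyFindAllOccAux]
  | succ n ih =>
    intro tl sl start h0
    simp only [pyFindAllOccAux]
    by_cases hidx : PySem.Chars.findFrom tl sl start = -1
    · simp [hidx]
    · have hle := findFrom_start_le tl sl start h0 hidx
      simp only [if_neg hidx]
      refine List.Pairwise.cons ?_ (ih tl sl _ (by omega))
      intro y hy
      have := aux_lb n tl sl (PySem.Chars.findFrom tl sl start + 1) (by omega) y hy
      omega

lemma sweep_eq (b : Int) : ∀ (rem : List (Int × Int)) (cm : Option Int),
    sweepAux b rem cm = (rem.dropWhile (fun r => decide (r.1 < b)),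
      foldMax cm (rem.takeWhile (fun r => decide (r.1 < b)))) := by
  intro rem
  induction rem with
  | nil => intro cm; simp [sweepAux, foldMax]
  | cons r rs ih =>
    intro cm
    by_cases hr : r.1 < b
    · simp [sweepAux, hr, ih, foldMax]
    · simp [sweepAux, hr, foldMax]

lemma foldMax_append (cm : Option Int) (l1 l2 : List (Int × Int)) :
    foldMax cm (l1 ++ l2) = foldMax (foldMax cm l1) l2 := List.foldl_append ..

lemma anyGt (o : Int) : ∀ (l : List (Int × Int)) (cm : Option Int),
    optGtB (foldMax cm l) o = (optGtB cm o || l.any (fun r => decide (o < r.2))) := by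
  intro l
  induction l with
  | nil => intro cm; simp [foldMax, optGtB]
  | cons r rs ih =>
    intro cm
    have hstep : optGtB (some (match cm with | none => r.2 | some m => if r.2 > m then r.2 else m)) o
        = (optGtB cm o || decide (o < r.2)) := by
      cases cm with
      | none => simp [optGtB]
      | some m =>
        simp only [optGtB]
        split_ifs with hm
        · rw [Bool.eq_iff_iff]; simp; omega
        · rw [Bool.eq_iff_iff]; simp; omega
    show optGtB (foldMax _ rs) o = _
    rw [ih, hstep, List.any_cons, Bool.or_assoc]

lemma dropWhile_ge (b : Int) : ∀ (l : List (Int × Int)),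
    l.Pairwise (fun r s => r.1 ≤ s.1) →
    ∀ r ∈ l.dropWhile (fun r => decide (r.1 < b)), ¬ (r.1 < b) := by
  intro l
  induction l with
  | nil => intro _ r hr; simp at hr
  | cons x xs ih =>
    intro hp r hr
    obtain ⟨hx, hxs⟩ := List.pairwise_cons.mp hp
    rw [List.dropWhile_cons] at hr
    by_cases hxb : x.1 < b
    · simp only [hxb, decide_true, if_true] at hr
      exact ih hxs r hr
    · simp only [hxb, decide_false] at hr
      rcases List.mem_cons.mp hr with rfl | hr'
      · exact hxb
      · have := hx r hr'; omega

lemma minfold (key : Int → Int) : ∀ (l : List Int) (acc : Option Int),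
    l.foldl (fun b o => bestUpd b o (key o)) (acc.map (fun m => (m, key m)))
      = (l.foldl (mstep key) acc).map (fun m => (m, key m)) := by
  intro l
  induction l with
  | nil => intro acc; simp
  | cons o rest ih =>
    intro acc
    have hstep : bestUpd (acc.map (fun m => (m, key m))) o (key o)
        = (mstep key acc o).map (fun m => (m, key m)) := by
      cases acc with
      | none => simp [bestUpd, mstep]
      | some m =>
        simp only [Option.map_some, bestUpd, mstep]
        split_ifs <;> simp
    simp only [List.foldl_cons, hstep, ih]

lemma min?_eq_fold (l : List Int) (key : Int → Int) :
    PySem.List.min? l key = l.foldl (mstep key) none := by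
  simp only [PySem.List.min?]
  exact PySem.List.foldl_congr_mem _ _ _ _ (by intro acc x _; cases acc <;> rfl)

lemma mstep_const_zero_some : ∀ (l : List Int) (m : Int),
    l.foldl (mstep (fun _ => (0:Int))) (some m) = some m := by
  intro l
  induction l with
  | nil => intro m; rfl
  | cons x xs ih => intro m; simp only [List.foldl_cons, mstep]; exact ih m

lemma min?_const_zero (l : List Int) : PySem.List.min? l (fun _ => (0:Int)) = l.head? := by
  cases l with
  | nil => rfl
  | cons x xs => rw [min?_eq_fold, List.foldl_cons]; exact (mstep_const_zero_some xs x)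

lemma foldl_skip_if {α : Type} (p : α → Bool) : ∀ (l acc : List α),
    l.foldl (fun acc x => if p x then acc else acc ++ [x]) acc = acc ++ l.filter (fun x => !p x) := by
  intro l
  induction l with
  | nil => intro acc; simp
  | cons x xs ih => intro acc; cases h : p x <;> simp [h, ih]

-- the central simulation: B's sweep fold over sorted occurrences equals the pure
-- per-occurrence overlap test against the whole (sorted) range list
lemma simL (tl : List Char) (hint : Option Int) (L : Int) (ranges0 : List (Int × Int))
    (hs : ranges0.Pairwise (fun r s => r.1 ≤ s.1)) :
    ∀ (occs : List Int), occs.Pairwise (· ≤ ·) →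
    ∀ (pre rem : List (Int × Int)) (bW bP : Option (Int × Int)),
      ranges0 = pre ++ rem →
      (∀ o ∈ occs, ∀ r ∈ pre, r.1 < o + L) →
      (occs.foldl (stepB tl hint L) (rem, foldMax none pre, bW, bP)).2.2
        = occs.foldl (pureStep tl hint L ranges0) (bW, bP) := by
  intro occs
  induction occs with
  | nil => intro _ pre rem bW bP _ _; rfl
  | cons o rest ih =>
    intro hocc pre rem bW bP hsplit hpre
    obtain ⟨ho, hrest⟩ := List.pairwise_cons.mp hocc
    have hremp : rem.Pairwise (fun r s => r.1 ≤ s.1) :=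
      (List.pairwise_append.mp (hsplit ▸ hs)).2.1
    have hsweep := sweep_eq (o + L) rem (foldMax none pre)
    set tk := rem.takeWhile (fun r => decide (r.1 < o + L)) with htk
    set rm' := rem.dropWhile (fun r => decide (r.1 < o + L)) with hrm
    have hsplit' : ranges0 = (pre ++ tk) ++ rm' := by
      rw [hsplit, List.append_assoc, List.takeWhile_append_dropWhile]
    have hcm' : foldMax (foldMax none pre) tk = foldMax none (pre ++ tk) :=
      (foldMax_append none pre tk).symm
    have hpre' : ∀ r ∈ pre ++ tk, r.1 < o + L := by
      intro r hr
      rcases List.mem_append.mp hr with hr | hr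
      · exact hpre o (List.mem_cons_self) r hr
      · have := List.mem_takeWhile_imp hr; simpa using this
    have hrm'' : ∀ r ∈ rm', ¬ (r.1 < o + L) := dropWhile_ge (o + L) rem hremp
    -- overlap test equality
    have h1 : (pre ++ tk).any (fun r => decide (o < r.2 ∧ o + L > r.1))
        = (pre ++ tk).any (fun r => decide (o < r.2)) := by
      apply PySem.List.any_congr_mem
      intro r hr
      have := hpre' r hr
      simp only [decide_eq_decide]
      exact ⟨fun h => h.1, fun h => ⟨h, this⟩⟩
    have h2 : rm'.any (fun r => decide (o < r.2 ∧ o + L > r.1)) = false := by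
      rw [List.any_eq_false]
      intro r hr
      have := hrm'' r hr
      simp only [decide_eq_true_eq, not_and]
      intro _; omega
    have hov : optGtB (foldMax none (pre ++ tk)) o = ovlF ranges0 L o := by
      rw [anyGt]
      simp only [optGtB, Bool.false_or]
      conv_rhs => rw [ovlF, hsplit', List.any_append, h1, h2]
      rw [Bool.or_false]
    -- step equality
    simp only [List.foldl_cons]
    set nb := (if ovlF ranges0 L o then (bW, bP) else
            if wbF tl L o then (bestUpd bW o (keyF hint o), bP)
            else (bW, bestUpd bP o (keyF hint o))) with hnb
    have hstepB : stepB tl hint L (rem, foldMax none pre, bW, bP) o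
        = (rm', foldMax none (pre ++ tk), nb) := by
      simp only [stepB, hsweep, hcm', hov, hnb]
      by_cases hA : ovlF ranges0 L o
      · simp [hA]
      · by_cases hB : wbF tl L o
        · have hB' : is_word_boundary tl o (o + L) = true := hB
          cases hint <;> simp [hA, hB, hB', keyF]
        · have hB' : is_word_boundary tl o (o + L) = false := by
            simpa [wbF] using hB
          cases hint <;> simp [hA, hB, hB', keyF]
    rw [hstepB]
    have hpure : pureStep tl hint L ranges0 (bW, bP) o = nb := rfl
    rw [hpure]
    exact ih hrest (pre ++ tk) rm' nb.1 nb.2 hsplit'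
      (by
        intro o' ho' r hr
        rcases List.mem_append.mp hr with hr | hr
        · exact hpre o' (List.mem_cons_of_mem _ ho') r hr
        · have ha := hpre' r (List.mem_append.mpr (Or.inr hr))
          have hb := ho o' ho'
          omega)

theorem main_eq (text substring : String) (hint_start : Option Int) (used_ranges : List (Int × Int)) :
    find_best_occurrence text substring hint_start used_ranges
      = find_best_occurrence_alt text substring hint_start used_ranges := by
  simp only [find_best_occurrence, find_best_occurrence_alt]
  set tl := text.toList with htl
  set L := PySem.Str.len substring with hLdef
  by_cases hnil : find_all_occurrences text substring = []
  · simp [hnil]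
  · simp only [if_neg hnil]
    set occs := find_all_occurrences text substring with hoccs
    set ranges := PySem.List.sorted used_ranges (fun r : Int × Int => r.1) with hranges
    have hoccP : occs.Pairwise (· ≤ ·) := by
      rw [hoccs, find_all_occurrences]; exact aux_sorted _ _ _ 0 le_rfl
    have hsorted : ranges.Pairwise (fun r s => r.1 ≤ s.1) :=
      hranges ▸ PySem.List.sorted_pairwise used_ranges (fun r : Int × Int => r.1)
    have hperm : ranges.Perm used_ranges :=
      hranges ▸ PySem.List.sorted_perm used_ranges (fun r : Int × Int => r.1) false
    clear_value tl L occs ranges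
    -- ---------- A side: the valid list is a filter ----------
    have hval : occs.foldl (fun acc occ =>
        if used_ranges.any (fun r => decide (occ < r.2 ∧ occ + L > r.1))
        then acc else acc ++ [occ]) [] = occs.filter (fun o => !ovlF used_ranges L o) := by
      have h1 := foldl_skip_if
        (fun occ => used_ranges.any fun r => decide (occ < r.2 ∧ occ + L > r.1)) occs []
      rw [List.nil_append] at h1
      exact h1
    rw [hval]
    set V := occs.filter (fun o => !ovlF used_ranges L o) with hV
    -- ---------- B side: reduce the sweep fold to min? over the two filters ----------
    have hsim := simL tl hint_start L ranges hsorted occs hoccP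
      [] ranges none none (List.nil_append _).symm (by intro o _ r hr; simp at hr)
    simp only [foldMax, List.foldl_nil] at hsim
    have hfold2 : occs.foldl (pureStep tl hint_start L ranges) ((none, none) :
          Option (Int × Int) × Option (Int × Int))
        = occs.foldl (pureStep tl hint_start L used_ranges) (none, none) := by
      apply PySem.List.foldl_congr_mem
      intro acc x _
      have hx : ovlF ranges L x = ovlF used_ranges L x := by
        simp only [ovlF]; exact List.Perm.any_eq hperm
      unfold pureStep
      rw [hx]
    have hpw : occs.foldl (pureStep tl hint_start L used_ranges) ((none, none) :
          Option (Int × Int) × Option (Int × Int))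
        = occs.foldl (fun (s : Option (Int × Int) × Option (Int × Int)) (e : Int) =>
            (if (!ovlF used_ranges L e && wbF tl L e) then bestUpd s.1 e (keyF hint_start e) else s.1,
             if (!ovlF used_ranges L e && !wbF tl L e) then bestUpd s.2 e (keyF hint_start e) else s.2))
            (none, none) := by
      apply PySem.List.foldl_congr_mem
      intro acc x _
      simp only [pureStep]
      by_cases h1 : ovlF used_ranges L x
      · simp [h1]
      · by_cases h2 : wbF tl L x <;> simp [h1, h2]
    have hWfold : occs.foldl (fun (b : Option (Int × Int)) (e : Int) =>
          if (!ovlF used_ranges L e && wbF tl L e) then bestUpd b e (keyF hint_start e) else b) none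
        = (PySem.List.min? (V.filter (fun o => wbF tl L o)) (keyF hint_start)).map
            (fun m => (m, keyF hint_start m)) := by
      rw [PySem.List.foldl_if_eq_foldl_filter
        (p := fun e => (!ovlF used_ranges L e && wbF tl L e))
        (f := fun b e => bestUpd b e (keyF hint_start e))]
      have hWeq : occs.filter (fun e => !ovlF used_ranges L e && wbF tl L e)
          = V.filter (fun o => wbF tl L o) := by
        rw [hV, List.filter_filter]
        exact List.filter_congr (fun o _ => Bool.and_comm _ _)
      rw [hWeq, min?_eq_fold]
      have := minfold (keyF hint_start) (V.filter (fun o => wbF tl L o)) none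
      simpa using this
    have hPfold : occs.foldl (fun (b : Option (Int × Int)) (e : Int) =>
          if (!ovlF used_ranges L e && !wbF tl L e) then bestUpd b e (keyF hint_start e) else b) none
        = (PySem.List.min? (V.filter (fun o => !wbF tl L o)) (keyF hint_start)).map
            (fun m => (m, keyF hint_start m)) := by
      rw [PySem.List.foldl_if_eq_foldl_filter
        (p := fun e => (!ovlF used_ranges L e && !wbF tl L e))
        (f := fun b e => bestUpd b e (keyF hint_start e))]
      have hPeq : occs.filter (fun e => !ovlF used_ranges L e && !wbF tl L e)
          = V.filter (fun o => !wbF tl L o) := by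
        rw [hV, List.filter_filter]
        exact List.filter_congr (fun o _ => Bool.and_comm _ _)
      rw [hPeq, min?_eq_fold]
      have := minfold (keyF hint_start) (V.filter (fun o => !wbF tl L o)) none
      simpa using this
    have hprod := PySem.List.foldl_prod_mk
      (f := fun (b : Option (Int × Int)) (e : Int) =>
        if (!ovlF used_ranges L e && wbF tl L e) then bestUpd b e (keyF hint_start e) else b)
      (g := fun (b : Option (Int × Int)) (e : Int) =>
        if (!ovlF used_ranges L e && !wbF tl L e) then bestUpd b e (keyF hint_start e) else b)
      occs none none
    have hBB : (occs.foldl (stepB tl hint_start L)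
          ((ranges, none, none, none) :
            List (Int × Int) × Option Int × Option (Int × Int) × Option (Int × Int))).2.2
        = ((PySem.List.min? (V.filter (fun o => wbF tl L o)) (keyF hint_start)).map
            (fun m => (m, keyF hint_start m)),
           (PySem.List.min? (V.filter (fun o => !wbF tl L o)) (keyF hint_start)).map
            (fun m => (m, keyF hint_start m))) :=
      hsim.trans (hfold2.trans (hpw.trans (hprod.trans (by rw [hWfold, hPfold]))))
    rw [hBB]
    -- ---------- A side: the partition fold is the pair of filters ----------
    by_cases hVnil : V = []
    · rw [if_pos hVnil, hVnil]
      rfl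
    · rw [if_neg hVnil]
      have hcg : ∀ (acc : List Int × List Int), ∀ occ ∈ V,
          (if is_word_boundary tl occ (occ + L) then (acc.1 ++ [occ], acc.2)
           else (acc.1, acc.2 ++ [occ]))
          = (if wbF tl L occ then acc.1 ++ [occ] else acc.1,
             if !wbF tl L occ then acc.2 ++ [occ] else acc.2) := by
        intro acc occ _
        by_cases h : wbF tl L occ
        · have h' : is_word_boundary tl occ (occ + L) = true := h
          simp [h, h']
        · have h' : is_word_boundary tl occ (occ + L) = false := by
            simpa [wbF] using h
          simp [h, h']
      have hprod2 := PySem.List.foldl_prod_mk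
        (f := fun (s : List Int) (e : Int) => if wbF tl L e then s ++ [e] else s)
        (g := fun (s : List Int) (e : Int) => if !wbF tl L e then s ++ [e] else s)
        V ([] : List Int) ([] : List Int)
      have hpair : V.foldl (fun acc occ =>
          if is_word_boundary tl occ (occ + L) then (acc.1 ++ [occ], acc.2)
          else (acc.1, acc.2 ++ [occ])) (([], []) : List Int × List Int)
          = (V.filter (fun o => wbF tl L o), V.filter (fun o => !wbF tl L o)) :=
        (PySem.List.foldl_congr_mem _ _ _ _ hcg).trans (hprod2.trans (by
          rw [PySem.List.foldl_append_if_eq_filter, PySem.List.foldl_append_if_eq_filter]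
          simp))
      rw [hpair]
      set W := V.filter (fun o => wbF tl L o) with hW
      set P := V.filter (fun o => !wbF tl L o) with hP
      clear_value V W P
      -- ---------- final selection ----------
      cases hint_start with
      | none =>
        have hk : keyF none = fun _ => (0 : Int) := by funext o; rfl
        rw [hk, min?_const_zero, min?_const_zero, PySem.List.pyGet?_zero,
          ← List.head?_eq_getElem?]
        cases W with
        | nil => cases P <;> simp
        | cons w ws => simp
      | some h =>
        have hk : keyF (some h) = fun x => |x - h| := by funext o; rfl
        rw [hk]
        by_cases hWnil : W = []
        · rw [hWnil]
          have hNone : PySem.List.min? ([] : List Int) (fun x => |x - h|) = none := rfl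
          rw [hNone]
          simp only [ne_eq, not_true_eq_false, if_false, Option.map_none]
          cases hm : PySem.List.min? P (fun x => |x - h|) <;> simp
        · rw [if_pos hWnil]
          cases hm : PySem.List.min? W (fun x => |x - h|) with
          | none => exact absurd ((PySem.List.min?_eq_none_iff W _).mp hm) hWnil
          | some m => simp [hm]

-- ===== VERDICT (by name: the statement is the Claim_ definition above) =====
theorem find_best_occurrence_spec : Claim_equal_find_best_occurrence := by
  intro text substring hint_start used_ranges _
  exact main_eq text substring hint_start used_ranges
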